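-- pv_equiv track=rewrite | github.com/jkc-mycode/8-Puzzle-Problem-AStar-Algorithm- | 8_Puzzle_AStar.py | init_table
-- ===== SOURCE A (Python) =====
-- def init_table(n):
--     newlist = []
--     for i in range(n):
--         newlist.append([])
--         for j in range(n):
--             cal = i * n + j + 1
--             if cal == n*n:
--                 newlist[i].append(0)
--             else:
--                 newlist[i].append(cal)
--     return newlist
-- ===== SOURCE B (Python) =====
-- def init_table(n):
--     if n <= 0:
--         return []
--     flat = list(range(1, n * n)) + [0]
--     return [flat[i * n:(i + 1) * n] for i in range(n)]
-- ===== Notes on version B (the rewrite author's own statement) =====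
-- stated objective: simpler
-- what changed: Builds the flat goal sequence once as range(1,n*n)+[0] and reshapes it into rows by slicing, instead of computing each cell with index arithmetic and a per-cell last-cell branch inside nested loops.
import Mathlib
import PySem

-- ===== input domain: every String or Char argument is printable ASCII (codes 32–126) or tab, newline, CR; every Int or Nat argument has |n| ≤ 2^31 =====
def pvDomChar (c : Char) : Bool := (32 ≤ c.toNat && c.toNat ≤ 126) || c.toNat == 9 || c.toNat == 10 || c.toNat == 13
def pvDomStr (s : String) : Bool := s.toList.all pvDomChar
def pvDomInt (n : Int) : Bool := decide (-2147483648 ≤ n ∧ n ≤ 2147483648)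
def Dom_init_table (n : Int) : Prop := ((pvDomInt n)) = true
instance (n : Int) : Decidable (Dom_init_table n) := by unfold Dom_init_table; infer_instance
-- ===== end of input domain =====

-- B builds the flat goal sequence once and reshapes it by slicing; simpler than A's
-- nested loops with a per-cell branch. Equal return values (neither mutates input).

-- ===== PORT A =====
-- nested for-loops: outer appends a fresh row, inner appends 0 at the last cell, else i*n+j+1
def init_table (n : Int) : List (List Int) :=
  (PySem.List.pyRange 0 n 1).foldl (fun newlist i =>
    newlist ++ [(PySem.List.pyRange 0 n 1).foldl (fun row j =>
      let cal := i * n + j + 1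
      if cal = n * n then row ++ [0] else row ++ [cal]) []]) []

-- ===== PORT B =====
def init_table_alt (n : Int) : List (List Int) :=
  if n ≤ 0 then []
  else
    let flat := PySem.List.pyRange 1 (n * n) 1 ++ [0]
    (PySem.List.pyRange 0 n 1).map (fun i =>
      PySem.List.slice flat (some (i * n)) (some ((i + 1) * n)))

-- ===== PRECONDITION & SPEC =====
def Spec_init_table (n : Int) (out : List (List Int)) : Prop := out = init_table_alt n
instance (n : Int) (out : List (List Int)) : Decidable (Spec_init_table n out) := by unfold Spec_init_table; infer_instance

-- ===== CLAIM (what is proved, stated in full; the proofs are below) =====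
def Claim_equal_init_table : Prop := ∀ (n : Int), Dom_init_table n → Spec_init_table n (init_table n)

-- ===== LEMMAS AND PROOFS =====

-- a foldl that only appends singletons is a map
theorem foldl_append_singleton {α β : Type} (f : α → β) (l : List α) (init : List β) :
    l.foldl (fun acc x => acc ++ [f x]) init = init ++ l.map f := by
  induction l generalizing init with
  | nil => simp
  | cons x xs ih => simp [List.foldl_cons, ih]

-- A's row i equals B's slice of the flat sequence, for 0 ≤ i < n
theorem row_eq (n i : Int) (hi : 0 ≤ i) (hin : i < n) :
    (PySem.List.pyRange 0 n 1).map
        (fun j => if i * n + j + 1 = n * n then (0 : Int) else i * n + j + 1)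
      = PySem.List.slice (PySem.List.pyRange 1 (n * n) 1 ++ [0])
          (some (i * n)) (some ((i + 1) * n)) := by
  have hn : (0 : Int) < n := lt_of_le_of_lt hi hin
  have ha : (0 : Int) ≤ i * n := mul_nonneg hi (le_of_lt hn)
  have hb : (0 : Int) ≤ (i + 1) * n := mul_nonneg (by omega) (le_of_lt hn)
  have hub : (i + 1) * n ≤ n * n := by nlinarith
  rw [PySem.List.slice_toNat _ ha hb]
  have hadd : (i + 1) * n = i * n + n := by ring
  have hA : ((i * n).toNat : Int) = i * n := Int.toNat_of_nonneg ha
  have hB : ((i + 1) * n).toNat = (i * n).toNat + n.toNat := by omega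
  have hpr : (PySem.List.pyRange 1 (n * n) 1).length = (n * n - 1).toNat := by
    simp [PySem.List.length_pyRange_one]
  apply List.ext_getElem
  · simp [PySem.List.length_pyRange_one, hpr]
    omega
  · intro k h1 h2
    have hk : k < n.toNat := by
      simpa [PySem.List.length_pyRange_one] using h1
    have hkpr : ((i * n).toNat + k) < (PySem.List.pyRange 1 (n * n) 1 ++ [0]).length := by
      simp [hpr]; omega
    rw [List.getElem_map, PySem.List.getElem_pyRange_one, List.getElem_take,
        List.getElem_drop]
    have hkC : ((i * n).toNat + k : Int) = i * n + k := by push_cast [hA]; ring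
    by_cases hlast : i * n + (k : Int) + 1 = n * n
    · have hidx : ¬ ((i * n).toNat + k < (PySem.List.pyRange 1 (n * n) 1).length) := by
        rw [hpr]; omega
      rw [List.getElem_append_right (by omega)]
      simp [zero_add, hlast]
    · have hkle : (k : Int) + 1 ≤ n := by omega
      have hidx : (i * n).toNat + k < (PySem.List.pyRange 1 (n * n) 1).length := by
        rw [hpr]
        have : i * n + (k : Int) + 1 < n * n := by
          have : i * n + (k : Int) + 1 ≤ n * n := by nlinarith
          omega
        omega
      rw [List.getElem_append_left hidx, PySem.List.getElem_pyRange_one]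
      simp [zero_add, hlast]
      omega

-- ===== VERDICT (by name: the statement is the Claim_ definition above) =====
theorem init_table_spec : Claim_equal_init_table := by
  intro n _
  unfold Spec_init_table init_table init_table_alt
  by_cases hn : n ≤ 0
  · simp [hn, PySem.List.pyRange_one_eq_nil hn]
  · simp only [hn, if_false]
    have hfun : ∀ i : Int,
        (fun (row : List Int) (j : Int) =>
          let cal := i * n + j + 1
          if cal = n * n then row ++ [0] else row ++ [cal])
        = (fun (row : List Int) (j : Int) =>
            row ++ [if i * n + j + 1 = n * n then (0 : Int) else i * n + j + 1]) := by
      intro i; funext row j; by_cases h : i * n + j + 1 = n * n <;> simp [h]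
    simp only [hfun]
    rw [foldl_append_singleton, List.nil_append]
    apply List.map_congr_left
    intro i hi
    rw [PySem.List.mem_pyRange_one] at hi
    rw [foldl_append_singleton, List.nil_append]
    exact row_eq n i hi.1 hi.2
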